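-- pv_equiv track=rewrite | github.com/leonlan/projecteuler | pe101_125/pe116.py | pe116
-- ===== SOURCE A (Python) =====
-- def pe116(N):
--     """Computes in how many different ways a grey row of size N
--     can be covered with R/G/B tiles."""
--     Rway = [0]*(N+1)
--     Gway = [0]*(N+1)
--     Bway = [0]*(N+1)
--     R, G, B = [2, 3, 4]
--     for n in range(R, N+1):
--         Rway[n] = 1 + Rway[n-1] + Rway[n-R]
--         if n >= G:
--             Gway[n] = 1 + Gway[n-1] + Gway[n-G]
--         if n >= B:
--             Bway[n] = 1 + Bway[n-1] + Bway[n-B]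
--     return(Rway[N] + Gway[N] + Bway[N])
-- ===== SOURCE B (Python) =====
-- def pe116(N):
--     """Computes in how many different ways a grey row of size N
--     can be covered with R/G/B tiles."""
--     # For tile size k, (ways with at least one tile) + 1 satisfies the homogeneous
--     # recurrence g(n) = g(n-1) + g(n-k) with g(0..k-1) = 1; g(N) is the sum of the
--     # first row of the k x k companion matrix raised to the N-th power, computed
--     # by binary squaring in O(log N) matrix products.
--     def mat_mul(A, B):
--         k = len(A)
--         return [[sum(A[i][j] * B[j][c] for j in range(k)) for c in range(k)]
--                 for i in range(k)]
--
--     def mat_pow(M, e):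
--         if e == 0:
--             return [[1 if i == j else 0 for j in range(len(M))] for i in range(len(M))]
--         H = mat_pow(M, e // 2)
--         H2 = mat_mul(H, H)
--         return H2 if e % 2 == 0 else mat_mul(H2, M)
--
--     def companion(k):
--         # maps the state (g(n), g(n+1), ..., g(n+k-1)) to the shifted state
--         return [[1 if (i == k - 1 and (j == 0 or j == k - 1))
--                  else (1 if i != k - 1 and j == i + 1 else 0)
--                  for j in range(k)] for i in range(k)]
--
--     total = 0
--     for k in (2, 3, 4):
--         P = mat_pow(companion(k), N)
--         total += sum(P[0]) - 1
--     return total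
-- ===== Notes on version B (the rewrite author's own statement) =====
-- stated objective: faster
-- what changed: Replaces the O(N) three-array dynamic-programming loop by matrix exponentiation: for each tile size k the count plus one satisfies a homogeneous order-k recurrence, solved as the first row sum of the k x k companion matrix raised to the N-th power by binary squaring.
import Mathlib
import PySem

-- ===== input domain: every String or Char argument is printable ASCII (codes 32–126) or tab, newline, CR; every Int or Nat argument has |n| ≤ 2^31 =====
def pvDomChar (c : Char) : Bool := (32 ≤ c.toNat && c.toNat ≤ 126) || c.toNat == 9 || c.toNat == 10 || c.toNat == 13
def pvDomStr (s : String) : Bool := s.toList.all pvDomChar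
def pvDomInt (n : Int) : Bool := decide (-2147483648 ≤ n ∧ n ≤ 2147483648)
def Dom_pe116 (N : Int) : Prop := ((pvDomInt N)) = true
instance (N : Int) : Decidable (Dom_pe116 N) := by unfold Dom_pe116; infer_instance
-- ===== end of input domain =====

-- B replaces the O(N) dynamic-programming loop by companion-matrix exponentiation (binary squaring), an asymptotically faster O(log N) algorithm.

-- ===== PORT A =====
-- loop body of A's for-loop (state = (Rway, Gway, Bway), n the loop index)
def stepA (st : List Int × List Int × List Int) (n : Int) : List Int × List Int × List Int :=
  let Rw := PySem.List.pySetD st.1 n (1 + PySem.List.pyGetD st.1 (n-1) 0 + PySem.List.pyGetD st.1 (n-2) 0)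
  let Gw := if 3 ≤ n then PySem.List.pySetD st.2.1 n (1 + PySem.List.pyGetD st.2.1 (n-1) 0 + PySem.List.pyGetD st.2.1 (n-3) 0) else st.2.1
  let Bw := if 4 ≤ n then PySem.List.pySetD st.2.2 n (1 + PySem.List.pyGetD st.2.2 (n-1) 0 + PySem.List.pyGetD st.2.2 (n-4) 0) else st.2.2
  (Rw, Gw, Bw)

def pe116 (N : Int) : Int :=
  let Rway := List.replicate (N+1).toNat (0 : Int)
  let Gway := List.replicate (N+1).toNat (0 : Int)
  let Bway := List.replicate (N+1).toNat (0 : Int)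
  let st := (PySem.List.pyRange 2 (N+1) 1).foldl stepA (Rway, Gway, Bway)
  PySem.List.pyGetD st.1 N 0 + PySem.List.pyGetD st.2.1 N 0 + PySem.List.pyGetD st.2.2 N 0

-- ===== PORT B =====
-- Source B's mat_mul: sum(A[i][j]*B[j][c] for j in range(k)), rows/cols in range(k), k = len(A)
def matMul (A B : List (List Int)) : List (List Int) :=
  (List.range A.length).map (fun i =>
    (List.range A.length).map (fun c =>
      ∑ j ∈ Finset.range A.length, ((A.getD i []).getD j 0) * ((B.getD j []).getD c 0)))

-- Source B's mat_pow, binary squaring (identity matrix for e = 0)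
def idMat (k : Nat) : List (List Int) :=
  (List.range k).map (fun i => (List.range k).map (fun j => if i = j then (1 : Int) else 0))

def matPow (M : List (List Int)) : Nat → List (List Int)
  | 0 => idMat M.length
  | (e+1) =>
    let H := matPow M ((e+1)/2)
    let H2 := matMul H H
    if (e+1) % 2 == 0 then H2 else matMul H2 M
  decreasing_by omega

-- Source B's companion(k)
def companionL (k : Nat) : List (List Int) :=
  (List.range k).map (fun i => (List.range k).map (fun j =>
    if i = k - 1 ∧ (j = 0 ∨ j = k - 1) then (1 : Int)
    else if i ≠ k - 1 ∧ j = i + 1 then 1 else 0))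

-- Source B's 'for k in (2,3,4): total += sum(mat_pow(companion(k), N)[0]) - 1'
def pe116_alt (N : Int) : Int :=
  [2, 3, 4].foldl (fun total k =>
    total + (((matPow (companionL k) N.toNat).getD 0 []).sum - 1)) 0

-- ===== PRECONDITION & SPEC =====
-- A raises IndexError for N < 0 (Rway[N] on an empty list), so Pre_ is 0 ≤ N.
def Pre_pe116 (N : Int) : Prop := 0 ≤ N
instance (N : Int) : Decidable (Pre_pe116 N) := by unfold Pre_pe116; infer_instance
def pvWitness_pe116 : Int := 5

def Spec_pe116 (N : Int) (out : Int) : Prop := out = pe116_alt N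
instance (N : Int) (out : Int) : Decidable (Spec_pe116 N out) := by unfold Spec_pe116; infer_instance

-- ===== CLAIM (what is proved, stated in full; the proofs are below) =====
def Claim_equal_pe116 : Prop := ∀ (N : Int), Dom_pe116 N → Pre_pe116 N → Spec_pe116 N (pe116 N)

-- ===== LEMMAS AND PROOFS =====

-- g k n = (number of ways with tiles of size k) + 1, the homogeneous recurrences
def g2 : Nat → Int
  | 0 => 1 | 1 => 1 | (n+2) => g2 (n+1) + g2 n
def g3 : Nat → Int
  | 0 => 1 | 1 => 1 | 2 => 1 | (n+3) => g3 (n+2) + g3 n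
def g4 : Nat → Int
  | 0 => 1 | 1 => 1 | 2 => 1 | 3 => 1 | (n+4) => g4 (n+3) + g4 n

lemma g2_low (i : Nat) (h : i < 2) : g2 i = 1 := by
  interval_cases i <;> rfl
lemma g3_low (i : Nat) (h : i < 3) : g3 i = 1 := by
  interval_cases i <;> rfl
lemma g4_low (i : Nat) (h : i < 4) : g4 i = 1 := by
  interval_cases i <;> rfl

lemma g2_rec (n : Nat) (h : 2 ≤ n) : g2 n = g2 (n-1) + g2 (n-2) := by
  obtain ⟨m, rfl⟩ : ∃ m, n = m + 2 := ⟨n - 2, by omega⟩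
  simp [g2]
lemma g3_rec (n : Nat) (h : 3 ≤ n) : g3 n = g3 (n-1) + g3 (n-3) := by
  obtain ⟨m, rfl⟩ : ∃ m, n = m + 3 := ⟨n - 3, by omega⟩
  simp [g3]
lemma g4_rec (n : Nat) (h : 4 ≤ n) : g4 n = g4 (n-1) + g4 (n-4) := by
  obtain ⟨m, rfl⟩ : ∃ m, n = m + 4 := ⟨n - 4, by omega⟩
  simp [g4]

-- ------- A side: the DP arrays after processing range(2, m) -------
def arr (g : Nat → Int) (m L : Nat) : List Int := (List.range L).map (fun i => if i < m then g i - 1 else 0)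

lemma arr_getD (g : Nat → Int) (m L i : Nat) (hi : i < L) :
    (arr g m L).getD i 0 = if i < m then g i - 1 else 0 := by
  simp [arr, List.getD_eq_getElem?_getD, hi]

lemma arr_low (g : Nat → Int) (k m L : Nat) (hm : m ≤ k) (hlow : ∀ i, i < k → g i = 1) :
    arr g m L = List.replicate L 0 := by
  apply List.ext_getElem (by simp [arr])
  intro i h1 h2
  simp only [arr, List.getElem_map, List.getElem_range, List.getElem_replicate]
  split_ifs with hi
  · rw [hlow i (by omega)]; ring
  · rfl

lemma arr_stable (g : Nat → Int) (k m L : Nat) (hm : m < k) (hlow : ∀ i, i < k → g i = 1) :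
    arr g m L = arr g (m+1) L := by
  apply List.ext_getElem (by simp [arr])
  intro i h1 h2
  simp only [arr, List.getElem_map, List.getElem_range]
  rcases Nat.lt_trichotomy i m with h | h | h
  · simp [h, Nat.lt_succ_of_lt h]
  · subst h
    simp [hlow i hm]
  · have : ¬ i < m := by omega
    have : ¬ i < m + 1 := by omega
    simp [*]

-- one pySetD step on the array representation
lemma arr_set (g : Nat → Int) (k m L : Nat) (hm : m < L) (hk : k ≤ m) (hk1 : 1 ≤ k)
    (hrec : ∀ n, k ≤ n → g n = g (n-1) + g (n-k)) :
    PySem.List.pySetD (arr g m L) (m : Int)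
      (1 + PySem.List.pyGetD (arr g m L) ((m : Int) - 1) 0
         + PySem.List.pyGetD (arr g m L) ((m : Int) - k) 0)
    = arr g (m+1) L := by
  have h1 : ((m : Int) - 1) = ((m - 1 : Nat) : Int) := by omega
  have h2 : ((m : Int) - k) = ((m - k : Nat) : Int) := by omega
  rw [h1, h2, PySem.List.pyGetD_natCast, PySem.List.pyGetD_natCast, PySem.List.pySetD_natCast,
      arr_getD g m L (m-1) (by omega), arr_getD g m L (m-k) (by omega)]
  have hv : (1 + (if m - 1 < m then g (m-1) - 1 else 0) + (if m - k < m then g (m-k) - 1 else 0))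
      = g m - 1 := by
    rw [if_pos (by omega), if_pos (by omega), hrec m hk]; ring
  rw [hv]
  apply List.ext_getElem (by simp [arr])
  intro i hL1 hL2
  simp only [arr, List.getElem_set, List.getElem_map, List.getElem_range]
  rcases Nat.lt_trichotomy i m with h | h | h
  · simp [h, Nat.lt_succ_of_lt h, Nat.ne_of_lt' (a := i) h]
  · subst h; simp
  · have hne : ¬ m = i := by omega
    have : ¬ i < m := by omega
    have : ¬ i < m + 1 := by omega
    simp [*]

-- the full loop invariant
lemma loop_inv (L : Nat) : ∀ m : Nat, m ≤ L →
    (PySem.List.pyRange 2 (m : Int) 1).foldl stepA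
      (List.replicate L 0, List.replicate L 0, List.replicate L 0)
    = (arr g2 m L, arr g3 m L, arr g4 m L) := by
  intro m
  induction m with
  | zero =>
    intro _
    rw [PySem.List.pyRange_one_eq_nil (by omega)]
    rw [List.foldl_nil, arr_low g2 2 0 L (by omega) g2_low,
      arr_low g3 3 0 L (by omega) g3_low, arr_low g4 4 0 L (by omega) g4_low]
  | succ m ih =>
    intro hL
    by_cases hm : 2 ≤ m
    · have hcast : ((m + 1 : Nat) : Int) = (m : Int) + 1 := by push_cast; ring
      rw [hcast, PySem.List.pyRange_one_succ_right (by omega), List.foldl_append,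
          ih (by omega)]
      simp only [List.foldl_cons, List.foldl_nil]
      show stepA (arr g2 m L, arr g3 m L, arr g4 m L) (m : Int) = _
      unfold stepA
      simp only
      have hR : PySem.List.pySetD (arr g2 m L) (m : Int)
          (1 + PySem.List.pyGetD (arr g2 m L) ((m : Int) - 1) 0
             + PySem.List.pyGetD (arr g2 m L) ((m : Int) - 2) 0) = arr g2 (m+1) L := by
        have := arr_set g2 2 m L (by omega) hm (by omega) g2_rec
        norm_num at this ⊢
        exact this
      by_cases h3 : 3 ≤ m
      · by_cases h4 : 4 ≤ m
        · rw [if_pos (by exact_mod_cast (by omega : (3:Int) ≤ (m:Int))),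
              if_pos (by exact_mod_cast (by omega : (4:Int) ≤ (m:Int)))]
          have hG : PySem.List.pySetD (arr g3 m L) (m : Int)
              (1 + PySem.List.pyGetD (arr g3 m L) ((m : Int) - 1) 0
                 + PySem.List.pyGetD (arr g3 m L) ((m : Int) - 3) 0) = arr g3 (m+1) L := by
            have := arr_set g3 3 m L (by omega) h3 (by omega) g3_rec
            norm_num at this ⊢
            exact this
          have hB : PySem.List.pySetD (arr g4 m L) (m : Int)
              (1 + PySem.List.pyGetD (arr g4 m L) ((m : Int) - 1) 0
                 + PySem.List.pyGetD (arr g4 m L) ((m : Int) - 4) 0) = arr g4 (m+1) L := by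
            have := arr_set g4 4 m L (by omega) h4 (by omega) g4_rec
            norm_num at this ⊢
            exact this
          rw [hR, hG, hB]
        · rw [if_pos (by exact_mod_cast (by omega : (3:Int) ≤ (m:Int))),
              if_neg (by exact_mod_cast (by omega : ¬ (4:Int) ≤ (m:Int)))]
          have hG : PySem.List.pySetD (arr g3 m L) (m : Int)
              (1 + PySem.List.pyGetD (arr g3 m L) ((m : Int) - 1) 0
                 + PySem.List.pyGetD (arr g3 m L) ((m : Int) - 3) 0) = arr g3 (m+1) L := by
            have := arr_set g3 3 m L (by omega) h3 (by omega) g3_rec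
            norm_num at this ⊢
            exact this
          rw [hR, hG, ← arr_stable g4 4 m L (by omega) g4_low]
      · rw [if_neg (by exact_mod_cast (by omega : ¬ (3:Int) ≤ (m:Int))),
            if_neg (by exact_mod_cast (by omega : ¬ (4:Int) ≤ (m:Int)))]
        rw [hR, ← arr_stable g3 3 m L (by omega) g3_low,
            ← arr_stable g4 4 m L (by omega) g4_low]
    · -- m + 1 ≤ 2 : the range is still empty
      rw [PySem.List.pyRange_one_eq_nil (by omega)]
      rw [List.foldl_nil, arr_low g2 2 (m+1) L (by omega) g2_low,
        arr_low g3 3 (m+1) L (by omega) g3_low, arr_low g4 4 (m+1) L (by omega) g4_low]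

lemma pe116_closed (N : Int) (hN : 0 ≤ N) :
    pe116 N = (g2 N.toNat - 1) + (g3 N.toNat - 1) + (g4 N.toNat - 1) := by
  unfold pe116
  have hL : (N + 1).toNat = N.toNat + 1 := by omega
  have hNc : ((N.toNat + 1 : Nat) : Int) = N + 1 := by omega
  have hfold := loop_inv (N.toNat + 1) (N.toNat + 1) (le_refl _)
  rw [hNc] at hfold
  simp only [hL, hfold]
  have hNN : (N : Int) = ((N.toNat : Nat) : Int) := by omega
  rw [hNN, PySem.List.pyGetD_natCast, PySem.List.pyGetD_natCast, PySem.List.pyGetD_natCast,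
      arr_getD g2 _ _ _ (by omega), arr_getD g3 _ _ _ (by omega), arr_getD g4 _ _ _ (by omega)]
  rw [if_pos (by omega), if_pos (by omega), if_pos (by omega)]
  rw [Int.toNat_natCast]

-- ------- B side: list matrices correspond to Mathlib matrices -------
def toMat (k : Nat) (A : List (List Int)) : Matrix (Fin k) (Fin k) Int :=
  Matrix.of fun i j => (A.getD (i : Nat) []).getD (j : Nat) 0

def WfM (k : Nat) (A : List (List Int)) : Prop := A.length = k ∧ ∀ r ∈ A, r.length = k

lemma matMul_length (A B : List (List Int)) : (matMul A B).length = A.length := by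
  simp [matMul]

lemma wf_matMul (k : Nat) (A B : List (List Int)) (hA : A.length = k) : WfM k (matMul A B) := by
  constructor
  · simp [matMul, hA]
  · intro r hr
    simp only [matMul, hA, List.mem_map] at hr
    obtain ⟨i, _, rfl⟩ := hr
    simp

lemma wf_idMat (k : Nat) : WfM k (idMat k) := by
  constructor
  · simp [idMat]
  · intro r hr
    simp only [idMat, List.mem_map] at hr
    obtain ⟨i, _, rfl⟩ := hr
    simp

lemma toMat_matMul (k : Nat) (A B : List (List Int)) (hA : A.length = k) :
    toMat k (matMul A B) = toMat k A * toMat k B := by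
  funext i j
  have hgd : ∀ (x : Fin k),
      ((matMul A B).getD (i : Nat) []).getD (x : Nat) 0
        = ∑ l ∈ Finset.range k, ((A.getD (i : Nat) []).getD l 0) * ((B.getD l []).getD (x : Nat) 0) := by
    intro x
    have hi : (i : Nat) < k := i.isLt
    have hx : (x : Nat) < k := x.isLt
    simp [matMul, hA, List.getD_eq_getElem?_getD, hi, hx]
  calc toMat k (matMul A B) i j
      = ∑ l ∈ Finset.range k, ((A.getD (i : Nat) []).getD l 0) * ((B.getD l []).getD (j : Nat) 0) := hgd j
    _ = ∑ l : Fin k, ((A.getD (i : Nat) []).getD (l : Nat) 0) * ((B.getD (l : Nat) []).getD (j : Nat) 0) :=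
        (Fin.sum_univ_eq_sum_range (fun l => ((A.getD (i : Nat) []).getD l 0) * ((B.getD l []).getD (j : Nat) 0)) k).symm
    _ = (toMat k A * toMat k B) i j := by
        rw [Matrix.mul_apply]
        rfl

lemma toMat_idMat (k : Nat) : toMat k (idMat k) = 1 := by
  funext i j
  have hi : (i : Nat) < k := i.isLt
  have hj : (j : Nat) < k := j.isLt
  simp only [toMat, idMat, Matrix.of_apply, List.getD_eq_getElem?_getD]
  simp [hi, hj, Matrix.one_apply, Fin.ext_iff]

lemma matPow_length (M : List (List Int)) (e : Nat) : (matPow M e).length = M.length := by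
  induction e using Nat.strong_induction_on with
  | _ e ih =>
    match e with
    | 0 => simp [matPow, idMat]
    | (e+1) =>
      rw [matPow]
      by_cases hp : ((e+1) % 2 == 0) = true
      · rw [if_pos hp]
        simp [matMul_length, ih ((e+1)/2) (by omega)]
      · rw [if_neg hp]
        simp [matMul_length, ih ((e+1)/2) (by omega)]

lemma wf_matPow (k : Nat) (M : List (List Int)) (hM : M.length = k) (e : Nat) :
    WfM k (matPow M e) := by
  match e with
  | 0 => rw [matPow, hM]; exact wf_idMat k
  | (e+1) =>
    rw [matPow]
    have hH : (matPow M ((e+1)/2)).length = k := by rw [matPow_length, hM]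
    by_cases hp : ((e+1) % 2 == 0) = true
    · rw [if_pos hp]
      exact wf_matMul k _ _ hH
    · rw [if_neg hp]
      exact wf_matMul k _ _ (by rw [matMul_length, hH])

lemma toMat_matPow (k : Nat) (M : List (List Int)) (hM : M.length = k) (e : Nat) :
    toMat k (matPow M e) = (toMat k M) ^ e := by
  induction e using Nat.strong_induction_on with
  | _ e ih =>
    match e with
    | 0 => rw [matPow, hM, toMat_idMat, pow_zero]
    | (e+1) =>
      rw [matPow]
      have hH : (matPow M ((e+1)/2)).length = k := by rw [matPow_length, hM]
      have hHt := ih ((e+1)/2) (by omega)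
      by_cases hp : ((e+1) % 2 == 0) = true
      · have h2 : (e+1)/2 + (e+1)/2 = e + 1 := by
          have := Nat.div_add_mod (e+1) 2
          simp only [beq_iff_eq] at hp
          omega
        rw [if_pos hp, toMat_matMul k _ _ hH, hHt, ← pow_add, h2]
      · have h2 : (e+1)/2 + (e+1)/2 + 1 = e + 1 := by
          have := Nat.div_add_mod (e+1) 2
          simp only [beq_iff_eq] at hp
          omega
        rw [if_neg hp, toMat_matMul k _ _ (by rw [matMul_length, hH]),
            toMat_matMul k _ _ hH, hHt, ← pow_add, ← pow_succ, h2]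

-- sum of a list as a range sum of getD
lemma list_sum_getD (l : List Int) : l.sum = ∑ i ∈ Finset.range l.length, l.getD i 0 := by
  induction l with
  | nil => simp
  | cons a t ih =>
    rw [List.sum_cons, List.length_cons, Finset.sum_range_succ', ih]
    simp [add_comm]

-- the first row of a well-formed matrix list, summed, is the Fin-indexed row sum
lemma row0_sum (k : Nat) (hk : 0 < k) (P : List (List Int)) (h : WfM k P) :
    (P.getD 0 []).sum = ∑ j ∈ Finset.range k, (P.getD 0 []).getD j 0 := by
  obtain ⟨hlen, hrows⟩ := h
  have hmem : P.getD 0 [] ∈ P := by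
    cases P with
    | nil => simp at hlen; omega
    | cons a t => simp
  rw [list_sum_getD, hrows _ hmem]

-- concrete companion matrices
def cm2 : Matrix (Fin 2) (Fin 2) Int := !![0, 1; 1, 1]
def cm3 : Matrix (Fin 3) (Fin 3) Int := !![0, 1, 0; 0, 0, 1; 1, 0, 1]
def cm4 : Matrix (Fin 4) (Fin 4) Int := !![0, 1, 0, 0; 0, 0, 1, 0; 0, 0, 0, 1; 1, 0, 0, 1]

lemma toMat_companion2 : toMat 2 (companionL 2) = cm2 := by
  funext i j; fin_cases i <;> fin_cases j <;> rfl
lemma toMat_companion3 : toMat 3 (companionL 3) = cm3 := by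
  funext i j; fin_cases i <;> fin_cases j <;> rfl
lemma toMat_companion4 : toMat 4 (companionL 4) = cm4 := by
  funext i j; fin_cases i <;> fin_cases j <;> rfl

def s2 (n : Nat) : Fin 2 → Int := ![g2 n, g2 (n+1)]
def s3 (n : Nat) : Fin 3 → Int := ![g3 n, g3 (n+1), g3 (n+2)]
def s4 (n : Nat) : Fin 4 → Int := ![g4 n, g4 (n+1), g4 (n+2), g4 (n+3)]

lemma step2 (n : Nat) : cm2.mulVec (s2 n) = s2 (n+1) := by
  funext i
  fin_cases i <;>
    simp [cm2, Matrix.mulVec, dotProduct, Fin.sum_univ_two, s2, g2] <;> ring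
lemma step3 (n : Nat) : cm3.mulVec (s3 n) = s3 (n+1) := by
  funext i
  fin_cases i <;>
    simp [cm3, Matrix.mulVec, dotProduct, Fin.sum_univ_three, s3, g3] <;> ring
lemma step4 (n : Nat) : cm4.mulVec (s4 n) = s4 (n+1) := by
  funext i
  fin_cases i <;>
    simp [cm4, Matrix.mulVec, dotProduct, Fin.sum_univ_four, s4, g4] <;> ring

lemma pow_mulVec2 (n : Nat) : (cm2 ^ n).mulVec (s2 0) = s2 n := by
  induction n with
  | zero => simp
  | succ n ih => rw [pow_succ', ← Matrix.mulVec_mulVec, ih, step2]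
lemma pow_mulVec3 (n : Nat) : (cm3 ^ n).mulVec (s3 0) = s3 n := by
  induction n with
  | zero => simp
  | succ n ih => rw [pow_succ', ← Matrix.mulVec_mulVec, ih, step3]
lemma pow_mulVec4 (n : Nat) : (cm4 ^ n).mulVec (s4 0) = s4 n := by
  induction n with
  | zero => simp
  | succ n ih => rw [pow_succ', ← Matrix.mulVec_mulVec, ih, step4]

lemma firstRow2 (n : Nat) : ((matPow (companionL 2) n).getD 0 []).sum = g2 n := by
  have hlen : (companionL 2).length = 2 := by rfl
  have hpow := toMat_matPow 2 (companionL 2) hlen n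
  rw [toMat_companion2] at hpow
  calc ((matPow (companionL 2) n).getD 0 []).sum
      = ∑ j ∈ Finset.range 2, ((matPow (companionL 2) n).getD 0 []).getD j 0 :=
        row0_sum 2 (by omega) _ (wf_matPow 2 _ hlen n)
    _ = ∑ j : Fin 2, toMat 2 (matPow (companionL 2) n) 0 j :=
        (Fin.sum_univ_eq_sum_range (fun j => ((matPow (companionL 2) n).getD 0 []).getD j 0) 2).symm
    _ = ∑ j : Fin 2, (cm2 ^ n) 0 j := by rw [hpow]
    _ = (cm2 ^ n).mulVec (s2 0) 0 := by
        simp [Matrix.mulVec, dotProduct, Fin.sum_univ_two, s2, g2]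
    _ = g2 n := by rw [pow_mulVec2]; simp [s2]
lemma firstRow3 (n : Nat) : ((matPow (companionL 3) n).getD 0 []).sum = g3 n := by
  have hlen : (companionL 3).length = 3 := by rfl
  have hpow := toMat_matPow 3 (companionL 3) hlen n
  rw [toMat_companion3] at hpow
  calc ((matPow (companionL 3) n).getD 0 []).sum
      = ∑ j ∈ Finset.range 3, ((matPow (companionL 3) n).getD 0 []).getD j 0 :=
        row0_sum 3 (by omega) _ (wf_matPow 3 _ hlen n)
    _ = ∑ j : Fin 3, toMat 3 (matPow (companionL 3) n) 0 j :=
        (Fin.sum_univ_eq_sum_range (fun j => ((matPow (companionL 3) n).getD 0 []).getD j 0) 3).symm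
    _ = ∑ j : Fin 3, (cm3 ^ n) 0 j := by rw [hpow]
    _ = (cm3 ^ n).mulVec (s3 0) 0 := by
        simp [Matrix.mulVec, dotProduct, Fin.sum_univ_three, s3, g3]
    _ = g3 n := by rw [pow_mulVec3]; simp [s3]
lemma firstRow4 (n : Nat) : ((matPow (companionL 4) n).getD 0 []).sum = g4 n := by
  have hlen : (companionL 4).length = 4 := by rfl
  have hpow := toMat_matPow 4 (companionL 4) hlen n
  rw [toMat_companion4] at hpow
  calc ((matPow (companionL 4) n).getD 0 []).sum
      = ∑ j ∈ Finset.range 4, ((matPow (companionL 4) n).getD 0 []).getD j 0 :=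
        row0_sum 4 (by omega) _ (wf_matPow 4 _ hlen n)
    _ = ∑ j : Fin 4, toMat 4 (matPow (companionL 4) n) 0 j :=
        (Fin.sum_univ_eq_sum_range (fun j => ((matPow (companionL 4) n).getD 0 []).getD j 0) 4).symm
    _ = ∑ j : Fin 4, (cm4 ^ n) 0 j := by rw [hpow]
    _ = (cm4 ^ n).mulVec (s4 0) 0 := by
        simp [Matrix.mulVec, dotProduct, Fin.sum_univ_four, s4, g4]
    _ = g4 n := by rw [pow_mulVec4]; simp [s4]

lemma pe116_alt_closed (N : Int) :
    pe116_alt N = (g2 N.toNat - 1) + (g3 N.toNat - 1) + (g4 N.toNat - 1) := by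
  unfold pe116_alt
  simp only [List.foldl_cons, List.foldl_nil]
  rw [firstRow2, firstRow3, firstRow4]
  ring

-- ===== VERDICT (by name: the statement is the Claim_ definition above) =====
theorem pe116_spec : Claim_equal_pe116 := by
  intro N _ hPre
  unfold Spec_pe116
  rw [pe116_closed N hPre, pe116_alt_closed]
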